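-- pv_equiv track=rewrite | github.com/windleblo/blog | fix_content.py | fix_headers
-- ===== SOURCE A (Python) =====
-- def fix_headers(content):
--     """Convert text headers to proper markdown headers"""
--     lines = content.split('\n')
--     fixed_lines = []
--
--     for i, line in enumerate(lines):
--         # Skip if line is empty or already a header
--         if not line.strip() or line.strip().startswith('#'):
--             fixed_lines.append(line)
--             continue
--
--         # Look for standalone lines that might be headers
--         # - Short lines (under 60 chars)
--         # - Not part of a paragraph (surrounded by empty lines)
--         # - Don't contain common paragraph words
--         if (len(line.strip()) < 60 and
--             line.strip() and
--             not line.strip().endswith('.') and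
--             not line.strip().endswith(',') and
--             not line.strip().endswith(':') and
--             not line.strip().startswith('![') and
--             not line.strip().startswith('http') and
--             not line.strip().startswith('*')):
--
--             # Check if surrounded by empty lines or at start/end
--             prev_empty = i == 0 or not lines[i-1].strip()
--             next_empty = i == len(lines)-1 or not lines[i+1].strip()
--
--             if prev_empty and next_empty:
--                 # This looks like a header
--                 fixed_lines.append(f"## {line.strip()}")
--                 continue
--
--         fixed_lines.append(line)
--
--     return '\n'.join(fixed_lines)
-- ===== SOURCE B (Python) =====
-- def _as_header(line):
--     """Header rule for a standalone line: return '## '+stripped if it qualifies, else the line."""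
--     s = line.strip()
--     if s.startswith('#'):
--         return line
--     if (len(s) < 60 and
--             not s.endswith('.') and
--             not s.endswith(',') and
--             not s.endswith(':') and
--             not s.startswith('![') and
--             not s.startswith('http') and
--             not s.startswith('*')):
--         return '## ' + s
--     return line
--
--
-- def fix_headers(content):
--     """Convert text headers to proper markdown headers.
--
--     Groups lines into maximal runs of consecutive non-blank lines; blank
--     lines pass through verbatim, runs of length > 1 pass through unchanged,
--     and a run of exactly one line is a candidate header."""
--     lines = content.split('\n')
--     out = []
--     n = len(lines)
--     i = 0
--     while i < n:
--         if not lines[i].strip():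
--             out.append(lines[i])
--             i += 1
--             continue
--         j = i
--         while j < n and lines[j].strip():
--             j += 1
--         run = lines[i:j]
--         if len(run) == 1:
--             out.append(_as_header(run[0]))
--         else:
--             out.extend(run)
--         i = j
--     return '\n'.join(out)
-- ===== Notes on version B (the rewrite author's own statement) =====
-- stated objective: alternative
-- what changed: Replaces per-index neighbor peeking (lines[i-1]/lines[i+1] via enumerate) with a single scan that groups lines into maximal runs of consecutive non-blank lines: blank lines and runs of length > 1 pass through, and only a length-1 run is tested by the header rule.
import Mathlib
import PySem

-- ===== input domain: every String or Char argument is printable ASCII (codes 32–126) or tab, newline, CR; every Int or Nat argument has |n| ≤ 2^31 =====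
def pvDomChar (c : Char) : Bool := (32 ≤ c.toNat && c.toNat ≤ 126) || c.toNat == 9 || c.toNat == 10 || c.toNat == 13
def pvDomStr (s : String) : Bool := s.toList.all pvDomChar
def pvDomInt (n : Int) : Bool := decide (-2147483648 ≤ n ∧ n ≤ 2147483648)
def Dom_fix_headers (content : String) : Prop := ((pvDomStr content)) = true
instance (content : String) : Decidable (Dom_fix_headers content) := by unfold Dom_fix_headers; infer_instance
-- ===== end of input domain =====

-- B replaces A's enumerate-with-neighbor-index-peeking by grouping the lines into maximal runs of
-- consecutive non-blank lines (alternative decomposition, same output).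

-- ===== PORT A =====
-- "not line.strip()" (blankness) is ported as: length of the stripped line is 0
def pvBlank (l : String) : Bool := PySem.Str.len (PySem.Str.strip l) == 0

-- header-eligibility test of A (the big `if` condition, minus the neighbor checks)
def pvCond (l : String) : Bool :=
  decide (PySem.Str.len (PySem.Str.strip l) < 60) &&
  !(PySem.Str.len (PySem.Str.strip l) == 0) &&
  !(PySem.Str.endswith (PySem.Str.strip l) ".") &&
  !(PySem.Str.endswith (PySem.Str.strip l) ",") &&
  !(PySem.Str.endswith (PySem.Str.strip l) ":") &&
  !(PySem.Str.startswith (PySem.Str.strip l) "![") &&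
  !(PySem.Str.startswith (PySem.Str.strip l) "http") &&
  !(PySem.Str.startswith (PySem.Str.strip l) "*")

-- the separator "\n" is nonempty, so split? never returns none; .getD [] is unreachable
def fix_headers (content : String) : String :=
  let lines := (PySem.Str.split? content "\n").getD []
  let fixed_lines := (PySem.List.enumerate lines).foldl (fun acc il =>
    let i := il.1
    let line := il.2
    acc ++ [
      if pvBlank line || PySem.Str.startswith (PySem.Str.strip line) "#" then line
      else if pvCond line then
        let prev_empty := i == 0 || pvBlank ((PySem.List.pyGet? lines (i-1)).getD "")
        let next_empty := i == (lines.length : Int) - 1 || pvBlank ((PySem.List.pyGet? lines (i+1)).getD "")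
        if prev_empty && next_empty then "## " ++ PySem.Str.strip line else line
      else line]) []
  PySem.Str.join "\n" fixed_lines

-- ===== PORT B =====
def pvAsHeader (l : String) : String :=
  if PySem.Str.startswith (PySem.Str.strip l) "#" then l
  else if decide (PySem.Str.len (PySem.Str.strip l) < 60) &&
          !(PySem.Str.endswith (PySem.Str.strip l) ".") &&
          !(PySem.Str.endswith (PySem.Str.strip l) ",") &&
          !(PySem.Str.endswith (PySem.Str.strip l) ":") &&
          !(PySem.Str.startswith (PySem.Str.strip l) "![") &&
          !(PySem.Str.startswith (PySem.Str.strip l) "http") &&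
          !(PySem.Str.startswith (PySem.Str.strip l) "*") then
    "## " ++ PySem.Str.strip l
  else l

-- Source B's inner scan `while j < n and lines[j].strip(): j += 1` + `run = lines[i:j]` is exactly the
-- takeWhile/dropWhile split of the remaining lines at the first blank line (exact).
def pvBGo : List String → List String
  | [] => []
  | l :: rest =>
    if _h : pvBlank l = true then l :: pvBGo rest
    else
      let run := (l :: rest).takeWhile (fun s => !pvBlank s)
      let rest' := (l :: rest).dropWhile (fun s => !pvBlank s)
      (if run.length == 1 then [pvAsHeader l] else run) ++ pvBGo rest'
termination_by lines => lines.length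
decreasing_by
  · simp
  · simp only [List.dropWhile_cons]
    rw [if_pos (by simp [_h])]
    exact Nat.lt_succ_of_le (List.length_dropWhile_le _ _)

def fix_headers_alt (content : String) : String :=
  PySem.Str.join "\n" (pvBGo ((PySem.Str.split? content "\n").getD []))

-- ===== PRECONDITION & SPEC =====
def Spec_fix_headers (content : String) (out : String) : Prop := out = fix_headers_alt content
instance (content : String) (out : String) : Decidable (Spec_fix_headers content out) := by unfold Spec_fix_headers; infer_instance

-- ===== CLAIM (what is proved, stated in full; the proofs are below) =====
def Claim_equal_fix_headers : Prop := ∀ (content : String), Dom_fix_headers content → Spec_fix_headers content (fix_headers content)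

-- ===== LEMMAS AND PROOFS =====

-- what A emits for one line, as a function of the two neighbor-blankness flags
def pvEmit (pe ne : Bool) (line : String) : String :=
  if pvBlank line || PySem.Str.startswith (PySem.Str.strip line) "#" then line
  else if pvCond line then
    if pe && ne then "## " ++ PySem.Str.strip line else line
  else line

-- A's per-line computation, with the index-based neighbor lookups, as a named function
def pvAEmit (lines : List String) (i : Int) (line : String) : String :=
  if pvBlank line || PySem.Str.startswith (PySem.Str.strip line) "#" then line
  else if pvCond line then
    let prev_empty := i == 0 || pvBlank ((PySem.List.pyGet? lines (i-1)).getD "")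
    let next_empty := i == (lines.length : Int) - 1 || pvBlank ((PySem.List.pyGet? lines (i+1)).getD "")
    if prev_empty && next_empty then "## " ++ PySem.Str.strip line else line
  else line

-- blankness of the following line ("next_empty" of A at the end of the list)
def pvNe (rest : List String) : Bool := match rest with | [] => true | m :: _ => pvBlank m

-- A's output on the line list, rephrased as a prev-flag / one-lookahead recursion
def pvSpecGo (pe : Bool) : List String → List String
  | [] => []
  | l :: rest =>
    pvEmit pe (pvNe rest) l :: pvSpecGo (pvBlank l) rest

theorem pvSpecGo_single (pe : Bool) (l : String) : pvSpecGo pe [l] = [pvEmit pe true l] := rfl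

theorem pvSpecGo_cons (pe : Bool) (l m : String) (rest : List String) :
    pvSpecGo pe (l :: m :: rest) = pvEmit pe (pvBlank m) l :: pvSpecGo (pvBlank l) (m :: rest) := rfl

theorem pvEmit_blank (pe ne : Bool) (l : String) (h : pvBlank l = true) : pvEmit pe ne l = l := by
  simp [pvEmit, h]

theorem pvEmit_pe_false (ne : Bool) (l : String) : pvEmit false ne l = l := by
  unfold pvEmit; split_ifs <;> simp_all

theorem pvEmit_ne_false (pe : Bool) (l : String) : pvEmit pe false l = l := by
  unfold pvEmit; split_ifs <;> simp_all

theorem pvSpecGo_blank_head (pe : Bool) (l : String) (rest : List String) (h : pvBlank l = true) :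
    pvSpecGo pe (l :: rest) = pvSpecGo true (l :: rest) := by
  simp [pvSpecGo, pvEmit_blank _ _ _ h]

theorem pvSpecGo_pe_false (lines : List String) :
    pvSpecGo false lines
      = lines.takeWhile (fun s => !pvBlank s) ++ pvSpecGo true (lines.dropWhile (fun s => !pvBlank s)) := by
  induction lines with
  | nil => simp [pvSpecGo]
  | cons l rest ih =>
    by_cases h : pvBlank l = true
    · simp [h, pvSpecGo_blank_head _ _ _ h]
    · have hb : pvBlank l = false := by simpa using h
      simp only [List.takeWhile_cons, List.dropWhile_cons, hb, Bool.not_false, if_true,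
        List.cons_append]
      cases rest with
      | nil => rw [pvSpecGo_single, pvEmit_pe_false]; simp [pvSpecGo]
      | cons m rest2 => rw [pvSpecGo_cons, pvEmit_pe_false, hb, ih]

theorem pvEmit_single (l : String) (h : pvBlank l = false) : pvEmit true true l = pvAsHeader l := by
  unfold pvEmit pvAsHeader pvCond
  rw [h]
  have hlen : (PySem.Str.len (PySem.Str.strip l) == 0) = false := by simpa [pvBlank] using h
  simp only [hlen, Bool.false_or, Bool.not_false, Bool.and_true]
  simp

-- B's run recursion equals the prev-flag recursion
theorem pvBGo_eq_spec : ∀ (n : Nat) (lines : List String), lines.length ≤ n →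
    pvBGo lines = pvSpecGo true lines := by
  intro n
  induction n with
  | zero =>
    intro lines h
    have : lines = [] := List.eq_nil_of_length_eq_zero (by omega)
    subst this; rw [pvBGo]; rfl
  | succ n ih =>
    intro lines hlen
    match lines with
    | [] => rw [pvBGo]; rfl
    | l :: rest =>
      by_cases hb : pvBlank l = true
      · rw [pvBGo, dif_pos hb, ih rest (by simpa using Nat.le_of_succ_le_succ (by simpa using hlen))]
        cases rest with
        | nil => rw [pvSpecGo_single, pvEmit_blank _ _ _ hb]; simp [pvSpecGo]
        | cons m rest2 => rw [pvSpecGo_cons, pvEmit_blank _ _ _ hb, hb]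
      · have hbf : pvBlank l = false := by simpa using hb
        rw [pvBGo, dif_neg hb]
        simp only [List.takeWhile_cons, List.dropWhile_cons, hbf, Bool.not_false, if_true]
        cases rest with
        | nil =>
          simp only [List.takeWhile_nil, List.dropWhile_nil, List.length_cons, List.length_nil]
          rw [pvBGo, pvSpecGo_single, pvEmit_single l hbf]
          simp
        | cons m rest2 =>
          have hlen' : (m :: rest2).length ≤ n := by
            simp only [List.length_cons] at hlen ⊢; omega
          by_cases hm : pvBlank m = true
          · simp only [List.takeWhile_cons, List.dropWhile_cons, hm, Bool.not_true,
              Bool.false_eq_true, if_false, List.length_cons, List.length_nil, Nat.zero_add]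
            rw [if_pos (by rfl)]
            rw [ih (m :: rest2) hlen']
            rw [pvSpecGo_cons]
            rw [hm]
            rw [pvEmit_single l hbf]
            rw [hbf]
            rw [List.singleton_append, pvSpecGo_blank_head false m rest2 hm]
          · have hmf : pvBlank m = false := by simpa using hm
            simp only [List.takeWhile_cons, List.dropWhile_cons, hmf, Bool.not_false, if_true]
            have hlt : (List.dropWhile (fun s => !pvBlank s) rest2).length ≤ n := by
              have := List.length_dropWhile_le (fun s => !pvBlank s) rest2
              simp only [List.length_cons] at hlen; omega
            rw [ih _ hlt]
            rw [if_neg (by simp [List.length_cons]), pvSpecGo_cons, hmf, pvEmit_ne_false, hbf,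
              pvSpecGo_pe_false]
            simp only [List.takeWhile_cons, List.dropWhile_cons, hmf, Bool.not_false, if_true,
              List.cons_append]

theorem pvSpecGo_cons' (pe : Bool) (l : String) (rest : List String) :
    pvSpecGo pe (l :: rest)
      = pvEmit pe (pvNe rest) l :: pvSpecGo (pvBlank l) rest := rfl

-- A's per-line emit with index lookups equals the flag form, at position pre.length
theorem pvAEmit_eq (pre rest : List String) (l : String) (pe : Bool)
    (hpe : pe = (decide (pre = []) || pvBlank ((pre.getLast?).getD ""))) :
    pvAEmit (pre ++ l :: rest) ((pre.length : Int)) l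
      = pvEmit pe (pvNe rest) l := by
  have hprev : (((pre.length : Int)) == 0
      || pvBlank ((PySem.List.pyGet? (pre ++ l :: rest) ((pre.length : Int) - 1)).getD "")) = pe := by
    rcases List.eq_nil_or_concat pre with h | ⟨ps, q, h⟩
    · subst h; simp [hpe]
    · subst h
      simp only [List.concat_eq_append] at hpe ⊢
      have h0 : ((((ps ++ [q]).length : Nat) : Int) == 0) = false := by
        simp only [beq_eq_false_iff_ne, ne_eq, List.length_append, List.length_cons]
        push_cast
        omega
      have hidx : (((ps ++ [q]).length : Nat) : Int) - 1 = ((ps.length : Nat) : Int) := by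
        simp [List.length_append]
      rw [h0, hidx, PySem.List.pyGet?_natCast, List.append_assoc,
        List.getElem?_append_right (le_refl ps.length)]
      simp [hpe]
  have hnext : (((pre.length : Int)) == (((pre ++ l :: rest).length : Nat) : Int) - 1
      || pvBlank ((PySem.List.pyGet? (pre ++ l :: rest) ((pre.length : Int) + 1)).getD ""))
      = pvNe rest := by
    cases rest with
    | nil =>
      have h1 : (((pre.length : Int)) == (((pre ++ [l]).length : Nat) : Int) - 1) = true := by
        simp only [beq_iff_eq]
        simp [List.length_append]
      rw [h1]
      simp [pvNe]
    | cons m rest2 =>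
      have h0 : (((pre.length : Int)) == (((pre ++ l :: m :: rest2).length : Nat) : Int) - 1) = false := by
        simp only [beq_eq_false_iff_ne, ne_eq]
        simp only [List.length_append, List.length_cons]
        push_cast
        omega
      have hidx : ((pre.length : Nat) : Int) + 1 = (((pre.length + 1 : Nat)) : Int) := by push_cast; ring
      rw [h0, hidx, PySem.List.pyGet?_natCast,
        List.getElem?_append_right (by omega : pre.length ≤ pre.length + 1)]
      simp [pvNe]
  simp only [pvAEmit, pvEmit]
  rw [hprev, hnext]

-- A's map over enumerate, generalized over an already-processed prefix
theorem pvMapA : ∀ (suf pre : List String) (pe : Bool),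
    pe = (decide (pre = []) || pvBlank ((pre.getLast?).getD "")) →
    (PySem.List.enumerate suf ((pre.length : Int))).map
        (fun il => pvAEmit (pre ++ suf) il.1 il.2) = pvSpecGo pe suf := by
  intro suf
  induction suf with
  | nil => intro pre pe _; rw [PySem.List.enumerate_nil]; rfl
  | cons l rest ih =>
    intro pre pe hpe
    rw [PySem.List.enumerate_cons, List.map_cons, pvSpecGo_cons']
    have htail := ih (pre ++ [l]) (pvBlank l) (by simp)
    have hlen1 : (((pre ++ [l]).length : Nat) : Int) = ((pre.length : Nat) : Int) + 1 := by
      simp [List.length_append]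
    rw [hlen1, ← List.append_cons] at htail
    rw [htail, pvAEmit_eq pre rest l pe hpe]

-- ===== VERDICT (by name: the statement is the Claim_ definition above) =====
theorem fix_headers_spec : Claim_equal_fix_headers := by
  intro content _
  show PySem.Str.join "\n"
      ((PySem.List.enumerate ((PySem.Str.split? content "\n").getD [])).foldl
        (fun acc il => acc ++ [pvAEmit ((PySem.Str.split? content "\n").getD []) il.1 il.2]) [])
    = PySem.Str.join "\n" (pvBGo ((PySem.Str.split? content "\n").getD []))
  apply congrArg
  rw [PySem.List.foldl_append_singleton_eq_map
    (fun il : Int × String => pvAEmit ((PySem.Str.split? content "\n").getD []) il.1 il.2)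
    (PySem.List.enumerate ((PySem.Str.split? content "\n").getD [])) []]
  rw [List.nil_append]
  have h2 := pvMapA ((PySem.Str.split? content "\n").getD []) [] true (by simp [pvBlank])
  rw [List.nil_append] at h2
  rw [show (((List.length ([] : List String)) : Nat) : Int) = 0 from rfl] at h2
  rw [h2, pvBGo_eq_spec ((PySem.Str.split? content "\n").getD []).length _ le_rfl]
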